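-- pv_equiv track=rewrite | github.com/qiufengyuyi/sequence_tagging | load_and_predict.py | extract_entity_from_start_end_ids
-- ===== SOURCE A (Python) =====
-- def extract_entity_from_start_end_ids(orig_text,start_ids,end_ids):
--     # 根据开始，结尾标识，找到对应的实体
--     entity_list = []
--     for i,start_id in enumerate(start_ids):
--         if start_id == 0:
--             continue
--         j = i+1
--         find_end_tag = False
--         while j < len(end_ids):
--             # 若在遇到end=1之前遇到了新的start=1,则停止该实体的搜索
--             if start_ids[j] == 1:
--                 break
--             if end_ids[j] == 1:
--                 entity_list.append("".join(orig_text[i:j+1]))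
--                 find_end_tag = True
--                 break
--             else:
--                 j+=1
--         if not find_end_tag:
--             # 实体就一个单字
--             entity_list.append("".join(orig_text[i:i+1]))
--     return entity_list
-- ===== SOURCE B (Python) =====
-- def _next_table(ids, n):
--     # t[p] = smallest q >= p (q < n) with ids[q] == 1, else n; built right-to-left.
--     t = [n] * (n + 1)
--     for p in range(n - 1, -1, -1):
--         t[p] = p if ids[p] == 1 else t[p + 1]
--     return t
--
--
-- def extract_entity_from_start_end_ids(orig_text, start_ids, end_ids):
--     n = len(end_ids)
--     next_start1 = _next_table(start_ids[:n], n)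
--     next_end1 = _next_table(end_ids, n)
--     entity_list = []
--     for i, s in enumerate(start_ids):
--         if s != 0:
--             q = min(i + 1, n)
--             ne = next_end1[q]
--             ns = next_start1[q]
--             if ne < n and ne < ns:
--                 entity_list.append("".join(orig_text[i:ne + 1]))
--             else:
--                 entity_list.append("".join(orig_text[i:i + 1]))
--     return entity_list
-- ===== Notes on version B (the rewrite author's own statement) =====
-- stated objective: faster
-- what changed: Replaces A's per-start forward while-scan with two suffix tables (next index >= p with start_ids==1 / end_ids==1) built in one right-to-left pass, so each entity end is a table lookup instead of an inner scan.
-- outside the precondition, e.g. on extract_entity_from_start_end_ids(['a'], [0], [0, 0]): A returns [], B raises IndexError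
import Mathlib
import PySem

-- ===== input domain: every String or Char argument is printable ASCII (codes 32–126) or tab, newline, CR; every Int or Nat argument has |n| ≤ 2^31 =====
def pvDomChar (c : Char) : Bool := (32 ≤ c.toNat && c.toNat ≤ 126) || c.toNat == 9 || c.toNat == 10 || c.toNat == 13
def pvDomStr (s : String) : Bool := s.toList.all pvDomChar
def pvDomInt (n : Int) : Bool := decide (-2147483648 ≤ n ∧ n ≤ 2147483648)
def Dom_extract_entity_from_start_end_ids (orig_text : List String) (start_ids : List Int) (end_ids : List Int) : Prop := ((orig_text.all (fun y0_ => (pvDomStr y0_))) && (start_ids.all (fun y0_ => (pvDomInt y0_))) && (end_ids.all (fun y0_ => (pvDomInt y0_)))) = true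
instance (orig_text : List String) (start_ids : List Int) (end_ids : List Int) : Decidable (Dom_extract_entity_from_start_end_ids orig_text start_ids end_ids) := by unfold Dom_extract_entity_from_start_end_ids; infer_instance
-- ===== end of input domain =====

-- ===== PORT A =====
-- B changes: two suffix "next tag index" tables replace A's inner forward while-scan (O(n^2) worst case -> O(n)).
-- "".join(orig_text[i:j]) — shared by both ports, exact via PySem slice/join
def pvJoinSeg (orig_text : List String) (i j : Nat) : String :=
  PySem.Str.join "" (PySem.List.slice orig_text (some (i : Int)) (some (j : Int)))

-- A's inner while loop from j; returns the single string appended for start index i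
-- (the find_end_tag flag becomes the returned branch). start_ids[j] via pyGetD: in range under Pre_.
def pvAWhile (orig_text : List String) (start_ids end_ids : List Int) (i j : Nat) : String :=
  if _h : j < end_ids.length then
    if PySem.List.pyGetD start_ids (j : Int) 0 = 1 then pvJoinSeg orig_text i (i+1)
    else if PySem.List.pyGetD end_ids (j : Int) 0 = 1 then pvJoinSeg orig_text i (j+1)
    else pvAWhile orig_text start_ids end_ids i (j+1)
  else pvJoinSeg orig_text i (i+1)
termination_by end_ids.length - j

def extract_entity_from_start_end_ids (orig_text : List String) (start_ids : List Int) (end_ids : List Int) : List String :=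
  (PySem.List.enumerate start_ids).foldl
    (fun acc p =>
      if p.2 = 0 then acc
      else acc ++ [pvAWhile orig_text start_ids end_ids p.1.toNat (p.1.toNat + 1)])
    []

-- ===== PORT B =====
-- suffix table of Source B's _next_table, built right-to-left: entry p is p if ids[p]==1 else entry p+1, last entry n
def pvNextTab (ids : List Int) (p n : Nat) : List Nat :=
  match ids with
  | [] => [n]
  | v :: tl =>
      let rest := pvNextTab tl (p+1) n
      (if v = 1 then p else rest.getD 0 n) :: rest

def extract_entity_from_start_end_ids_alt (orig_text : List String) (start_ids : List Int) (end_ids : List Int) : List String :=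
  let n := end_ids.length
  let nsTab := pvNextTab (start_ids.take n) 0 n
  let neTab := pvNextTab end_ids 0 n
  (PySem.List.enumerate start_ids).foldl
    (fun acc p =>
      if p.2 ≠ 0 then
        let i := p.1.toNat
        let q := min (i + 1) n
        let ne := neTab.getD q n
        let ns := nsTab.getD q n
        acc ++ [if ne < n ∧ ne < ns then pvJoinSeg orig_text i (ne+1) else pvJoinSeg orig_text i (i+1)]
      else acc)
    []

-- ===== PRECONDITION & SPEC =====
-- Pre_ requires len(end_ids) ≤ len(start_ids): otherwise A's inner scan reads start_ids[j] for
-- j < len(end_ids) and raises IndexError on some such inputs, and B's table-building pass raises there.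
def Pre_extract_entity_from_start_end_ids (orig_text : List String) (start_ids : List Int) (end_ids : List Int) : Prop :=
  end_ids.length ≤ start_ids.length
instance (orig_text : List String) (start_ids : List Int) (end_ids : List Int) : Decidable (Pre_extract_entity_from_start_end_ids orig_text start_ids end_ids) := by unfold Pre_extract_entity_from_start_end_ids; infer_instance

def pvWitness_extract_entity_from_start_end_ids : List String × List Int × List Int :=
  (["a", "b"], [1, 0], [0, 1])

def Spec_extract_entity_from_start_end_ids (orig_text : List String) (start_ids : List Int) (end_ids : List Int) (out : List String) : Prop := out = extract_entity_from_start_end_ids_alt orig_text start_ids end_ids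
instance (orig_text : List String) (start_ids : List Int) (end_ids : List Int) (out : List String) : Decidable (Spec_extract_entity_from_start_end_ids orig_text start_ids end_ids out) := by unfold Spec_extract_entity_from_start_end_ids; infer_instance

-- ===== CLAIM (what is proved, stated in full; the proofs are below) =====
def Claim_equal_extract_entity_from_start_end_ids : Prop := ∀ (orig_text : List String) (start_ids : List Int) (end_ids : List Int), Dom_extract_entity_from_start_end_ids orig_text start_ids end_ids → Pre_extract_entity_from_start_end_ids orig_text start_ids end_ids → Spec_extract_entity_from_start_end_ids orig_text start_ids end_ids (extract_entity_from_start_end_ids orig_text start_ids end_ids)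

-- ===== LEMMAS AND PROOFS =====

theorem pvNextTab_getD_last (ids : List Int) (p n : Nat) :
    (pvNextTab ids p n).getD ids.length n = n := by
  induction ids generalizing p with
  | nil => simp [pvNextTab]
  | cons v tl ih => simpa [pvNextTab] using ih (p+1)

theorem pvNextTab_getD_lt (ids : List Int) (p n k : Nat) (hk : k < ids.length) :
    (pvNextTab ids p n).getD k n =
      if ids[k] = 1 then p + k else (pvNextTab ids p n).getD (k+1) n := by
  induction ids generalizing p k with
  | nil => simp at hk
  | cons v tl ih =>
      cases k with
      | zero => simp [pvNextTab]
      | succ k =>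
          have hk' : k < tl.length := by simpa using hk
          simpa [pvNextTab, Nat.add_assoc, Nat.add_comm, Nat.add_left_comm] using ih (p+1) k hk'

theorem pvNextTab_ge (ids : List Int) (p n k : Nat) (hk : k ≤ ids.length) :
    p + k ≤ (pvNextTab ids p n).getD k n ∨ (pvNextTab ids p n).getD k n = n := by
  induction ids generalizing p k with
  | nil =>
      have : k = 0 := by simpa using hk
      subst this
      simp [pvNextTab]
  | cons v tl ih =>
      cases k with
      | zero =>
          by_cases hv : v = 1
          · left; simp [pvNextTab, hv]
          · have := ih (p+1) 0 (by omega)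
            simp [pvNextTab, hv] at this ⊢
            omega
      | succ k =>
          have := ih (p+1) k (by simpa using hk)
          simp [pvNextTab] at this ⊢
          omega

-- the core correspondence: A's inner scan from j equals B's table formula at j
theorem pvAWhile_eq (orig_text : List String) (start_ids end_ids : List Int)
    (hse : end_ids.length ≤ start_ids.length) (i j : Nat) (hj : j ≤ end_ids.length) :
    pvAWhile orig_text start_ids end_ids i j =
      (if (pvNextTab end_ids 0 end_ids.length).getD j end_ids.length < end_ids.length ∧
          (pvNextTab end_ids 0 end_ids.length).getD j end_ids.length <
            (pvNextTab (start_ids.take end_ids.length) 0 end_ids.length).getD j end_ids.length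
       then pvJoinSeg orig_text i ((pvNextTab end_ids 0 end_ids.length).getD j end_ids.length + 1)
       else pvJoinSeg orig_text i (i+1)) := by
  have htake : (start_ids.take end_ids.length).length = end_ids.length := by
    simp [hse]
  obtain ⟨d, hd⟩ : ∃ d, end_ids.length - j = d := ⟨_, rfl⟩
  induction d generalizing j with
  | zero =>
      have hj' : j = end_ids.length := by omega
      subst hj'
      rw [pvAWhile, dif_neg (by omega), pvNextTab_getD_last, if_neg (by omega)]
  | succ d ih =>
      have hjlt : j < end_ids.length := by omega
      have hjs : j < start_ids.length := by omega
      have hgs : PySem.List.pyGetD start_ids (j : Int) 0 = start_ids[j] := by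
        rw [PySem.List.pyGetD_natCast, List.getD_eq_getElem _ _ hjs]
      have hge : PySem.List.pyGetD end_ids (j : Int) 0 = end_ids[j] := by
        rw [PySem.List.pyGetD_natCast, List.getD_eq_getElem _ _ hjlt]
      have hts : (pvNextTab (start_ids.take end_ids.length) 0 end_ids.length).getD j end_ids.length =
          if start_ids[j] = 1 then j
          else (pvNextTab (start_ids.take end_ids.length) 0 end_ids.length).getD (j+1) end_ids.length := by
        rw [pvNextTab_getD_lt _ 0 _ j (by omega)]
        simp [List.getElem_take]
      have hte : (pvNextTab end_ids 0 end_ids.length).getD j end_ids.length =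
          if end_ids[j] = 1 then j
          else (pvNextTab end_ids 0 end_ids.length).getD (j+1) end_ids.length := by
        rw [pvNextTab_getD_lt _ 0 _ j hjlt]
        simp
      rw [pvAWhile, dif_pos hjlt, hgs, hge]
      by_cases hs1 : start_ids[j] = 1
      · -- A breaks on a new start: single char; B: ns = j, ne ≥ j so the strict test fails
        rw [if_pos hs1]
        have hne := pvNextTab_ge end_ids 0 end_ids.length j (by omega)
        rw [hts, if_pos hs1]
        rcases hne with h | h
        · rw [if_neg (by omega)]
        · rw [if_neg (by omega)]
      · rw [if_neg hs1]
        by_cases he1 : end_ids[j] = 1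
        · -- A finds the end at j; B: ne = j < n and ns ≥ j+1 (or = n), both > j
          rw [if_pos he1, hte, if_pos he1, hts, if_neg hs1]
          have hns := pvNextTab_ge (start_ids.take end_ids.length) 0 end_ids.length (j+1) (by omega)
          rcases hns with h | h
          · rw [if_pos (by constructor <;> omega)]
          · rw [if_pos (by constructor <;> omega)]
        · -- neither tag at j: both sides step to j+1
          rw [if_neg he1, hte, if_neg he1, hts, if_neg hs1]
          exact ih (j+1) (by omega) (by omega)

-- per start index i: A's scan from i+1 equals B's lookup at q = min (i+1) n
theorem pv_step_eq (orig_text : List String) (start_ids end_ids : List Int)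
    (hse : end_ids.length ≤ start_ids.length) (i : Nat) :
    pvAWhile orig_text start_ids end_ids i (i+1) =
      (if (pvNextTab end_ids 0 end_ids.length).getD (min (i+1) end_ids.length) end_ids.length < end_ids.length ∧
          (pvNextTab end_ids 0 end_ids.length).getD (min (i+1) end_ids.length) end_ids.length <
            (pvNextTab (start_ids.take end_ids.length) 0 end_ids.length).getD (min (i+1) end_ids.length) end_ids.length
       then pvJoinSeg orig_text i ((pvNextTab end_ids 0 end_ids.length).getD (min (i+1) end_ids.length) end_ids.length + 1)
       else pvJoinSeg orig_text i (i+1)) := by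
  by_cases h : i + 1 ≤ end_ids.length
  · rw [Nat.min_eq_left h]
    exact pvAWhile_eq orig_text start_ids end_ids hse i (i+1) h
  · have hmin : min (i+1) end_ids.length = end_ids.length := by omega
    rw [hmin, pvAWhile, dif_neg (by omega)]
    rw [pvNextTab_getD_last]
    rw [if_neg (by omega)]

theorem pv_foldl_ext {α β : Type} (f g : α → β → α) (h : ∀ a b, f a b = g a b) (l : List β) (a : α) :
    l.foldl f a = l.foldl g a := by
  have : f = g := funext fun x => funext (h x)
  rw [this]

-- ===== VERDICT (by name: the statement is the Claim_ definition above) =====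
theorem extract_entity_from_start_end_ids_spec : Claim_equal_extract_entity_from_start_end_ids := by
  intro orig_text start_ids end_ids _hdom hpre
  unfold Spec_extract_entity_from_start_end_ids
  unfold Pre_extract_entity_from_start_end_ids at hpre
  simp only [extract_entity_from_start_end_ids, extract_entity_from_start_end_ids_alt]
  apply pv_foldl_ext
  intro acc p
  by_cases h0 : p.2 = 0
  · simp [h0]
  · simp only [h0, if_neg, ne_eq, not_false_iff, if_true]
    rw [pv_step_eq orig_text start_ids end_ids hpre p.1.toNat]
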